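-- pv_equiv track=rewrite | github.com/sakurasakura1996/Leetcode | leetcode_weekly_competition/200/5477_自己敲一遍看看.py | minSwaps_2
-- ===== SOURCE A (Python) =====
-- from typing import List
--
-- def minSwaps_2(grid:List[List[int]]) -> int:
--     # 冒泡的思路感觉比贪心要复杂一点，冒泡的核心思想就是生成一个数组，数组的第i个数表示grid中第i行最终需要被安排到数组中该数这一行。
--     # 比如 ans = [3,2,0,1]就表示，第0行需要被安放到第3行，第1行需要被安放到第2行，第2行需要被安放到第0行...最后总共的操作次数就是
--     # 冒泡排序的交换次数。思路挺有想法的，但是编码起来感觉有点小吃力，多学习，多敲代码，代码能力是日以继夜的练习才能锻炼出来的啊，加油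
--     n = len(grid)
--     # 统计每一行从右往左0的个数
--     temp = [-1 for _ in range(n)]
--     for i in range(n):
--         count = 0
--         # 下面的这个写法导致了程序运行不停止，没看懂为啥会出现这个问题啊，不就是统计从右往左有多少个连续的0吗,卧槽，低级错误，你特么j不减怎么会停止循环吗，
--         j = n-1
--         while j >= 0 and grid[i][j] == 0:
--             count += 1
--             j -= 1
--
--         value = n - 1 - count  # value表示的是现在的第i行最终需要被分配到的位置
--         # 判断当前的value是否超出了边界
--         if value < 0:
--             value = 0
--
--         # 然后我们再考虑：那么第i行应该被放到第value行对吧，但是value行如果已经被别人占了呢，也就是说可能第i行之前，可能就有某一行和第i行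
--         # 0的个数相同，然后被分配到了这一行，那么还可以往下分配，因为越往下，所需的0的个数越来越少啊
--         if temp[value] != -1:
--             flag = 0
--             for k in range(n-count,n):
--                 if temp[k] == -1:
--                     flag = 1
--                     temp[k] = i
--                     # 注意搞清楚这里的逻辑不是temp[i] = j，因为我们本来的想法是把第i行给移到第value行的，那么用temp
--                     # 存储的时候，我们用的方法应该是，temp数组中第value个数等于i,然后用冒泡排序来排序。
--                     break
--             # 如果没有找到，说明不满足条件，返回-1了
--             if flag == 0:
--                 return -1
--         else:
--             temp[value] = i
--     ans = 0
--     for i in range(n):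
--         for j in range(n-i-1):
--             if temp[j] > temp[j+1]:
--                 ans += 1
--                 temp[j],temp[j+1] = temp[j+1], temp[j]
--     return ans
-- ===== SOURCE B (Python) =====
-- def minSwaps_2(grid):
--     # Free-slot greedy: keep the ascending list of still-unassigned target rows,
--     # give each row the first free slot it can legally occupy, then count
--     # inversions of the resulting permutation directly (no bubble sort).
--     n = len(grid)
--     free = list(range(n))          # unassigned target positions, ascending
--     perm = [0] * n
--     for i in range(n):
--         c = 0
--         for x in reversed(grid[i][:n]):
--             if x != 0:
--                 break
--             c += 1
--         lo = n - 1 - c             # highest position row i may occupy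
--         if lo < 0:
--             lo = 0
--         slot = next((f for f in free if f >= lo), None)
--         if slot is None:
--             return -1
--         free.remove(slot)
--         perm[slot] = i
--     ans = 0
--     rest = perm
--     while rest:
--         x, rest = rest[0], rest[1:]
--         ans += sum(1 for y in rest if x > y)
--     return ans
-- ===== Notes on version B (the rewrite author's own statement) =====
-- stated objective: alternative
-- what changed: B replaces A's temp-array slot probing with clamped downward flag-scan by a sorted free-slot list (first free slot >= the row's bound, then remove it), and replaces A's in-place bubble sort swap counting by a direct inversion count over suffixes.
-- outside the precondition, e.g. on minSwaps_2([[1, 1, 1], [1, 1, 1], []]): A returns -1, B returns -1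
import Mathlib
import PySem

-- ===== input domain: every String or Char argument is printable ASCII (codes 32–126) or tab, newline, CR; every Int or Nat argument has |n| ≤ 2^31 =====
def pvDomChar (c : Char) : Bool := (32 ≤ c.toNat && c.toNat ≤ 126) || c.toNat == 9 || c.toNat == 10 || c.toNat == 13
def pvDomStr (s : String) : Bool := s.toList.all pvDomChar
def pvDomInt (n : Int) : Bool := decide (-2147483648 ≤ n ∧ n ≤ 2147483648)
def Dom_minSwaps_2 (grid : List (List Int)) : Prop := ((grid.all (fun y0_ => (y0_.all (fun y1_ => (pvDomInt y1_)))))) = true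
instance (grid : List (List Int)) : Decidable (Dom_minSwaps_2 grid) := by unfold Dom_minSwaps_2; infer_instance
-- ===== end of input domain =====

-- B replaces A's temp-array probing + downward scan by a sorted free-slot list and A's
-- bubble-sort swap counting by a direct inversion count (objective: alternative).

-- ===== PORT A =====
-- while j >= 0 and grid[i][j] == 0: count += 1; j -= 1   (indices j < n are in range under Pre_)
def pvA_count (row : List Int) : Nat → Nat
  | 0 => 0
  | j + 1 => if row.getD j 0 = 0 then pvA_count row j + 1 else 0

-- for k in range(s, n): if temp[k] == -1: ... break   (returns the found k, none = flag stays 0)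
def pvA_find (temp : List Int) (s n : Nat) : Option Nat :=
  if s < n then
    (if temp.getD s 0 = -1 then some s else pvA_find temp (s + 1) n)
  else none
termination_by n - s

-- the outer 'for i in range(n)' with the early 'return -1' modelled as none
def pvA_loop (grid : List (List Int)) (n : Nat) : List Nat → List Int → Option (List Int)
  | [], temp => some temp
  | i :: rest, temp =>
    let count := pvA_count (grid.getD i []) n
    let v : Int := (n : Int) - 1 - (count : Int)
    let value : Nat := if v < 0 then 0 else v.toNat
    if temp.getD value 0 ≠ -1 then
      match pvA_find temp (n - count) n with
      | none => none
      | some k => pvA_loop grid n rest (temp.set k (i : Int))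
    else pvA_loop grid n rest (temp.set value (i : Int))

-- if temp[j] > temp[j+1]: ans += 1; temp[j], temp[j+1] = temp[j+1], temp[j]
def pvA_swapStep (st : List Int × Int) (j : Nat) : List Int × Int :=
  if st.1.getD j 0 > st.1.getD (j + 1) 0 then
    (((st.1.set j (st.1.getD (j + 1) 0)).set (j + 1) (st.1.getD j 0)), st.2 + 1)
  else st

def pvA_bubble (n : Nat) (temp : List Int) : Int :=
  ((List.range n).foldl (fun st i => (List.range (n - i - 1)).foldl pvA_swapStep st) (temp, 0)).2

def minSwaps_2 (grid : List (List Int)) : Int :=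
  let n := grid.length
  match pvA_loop grid n (List.range n) (List.replicate n (-1)) with
  | none => -1
  | some temp => pvA_bubble n temp

-- ===== PORT B =====
-- for x in reversed(grid[i][:n]): if x != 0: break; c += 1
def pvB_count : List Int → Nat
  | [] => 0
  | x :: t => if x ≠ 0 then 0 else pvB_count t + 1

-- the outer loop of B: free = ascending unassigned slots, perm = assignment built so far
def pvB_loop (grid : List (List Int)) (n : Nat) : List Nat → List Int → List Int → Option (List Int)
  | [], _, perm => some perm
  | i :: rest, free, perm =>
    let c := pvB_count (((grid.getD i []).take n).reverse)
    let lo0 : Int := (n : Int) - 1 - (c : Int)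
    let lo : Int := if lo0 < 0 then 0 else lo0
    match free.find? (fun f => decide (lo ≤ f)) with
    | none => none
    | some slot => pvB_loop grid n rest (free.erase slot) (perm.set slot.toNat (i : Int))

-- while rest: x, rest = rest[0], rest[1:]; ans += sum(1 for y in rest if x > y)
def pvB_inv : List Int → Int
  | [] => 0
  | x :: t => (t.countP (fun y => decide (y < x)) : Int) + pvB_inv t

def minSwaps_2_alt (grid : List (List Int)) : Int :=
  let n := grid.length
  match pvB_loop grid n (List.range n) ((List.range n).map Int.ofNat) (List.replicate n 0) with
  | none => -1
  | some perm => pvB_inv perm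

-- ===== PRECONDITION & SPEC =====
-- A reads row[n-1] of every processed row, so a row shorter than the number of rows raises
-- IndexError; Pre_ excludes all such grids, which also drops the rare grids where A returns -1
-- before ever touching the short row (see claim cites: on those both programs return -1 anyway).
def Pre_minSwaps_2 (grid : List (List Int)) : Prop := ∀ row ∈ grid, grid.length ≤ row.length
instance (grid : List (List Int)) : Decidable (Pre_minSwaps_2 grid) := by unfold Pre_minSwaps_2; infer_instance

def pvWitness_minSwaps_2 : List (List Int) := [[1, 0], [1, 1]]

def Spec_minSwaps_2 (grid : List (List Int)) (out : Int) : Prop := out = minSwaps_2_alt grid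
instance (grid : List (List Int)) (out : Int) : Decidable (Spec_minSwaps_2 grid out) := by unfold Spec_minSwaps_2; infer_instance

-- ===== CLAIM (what is proved, stated in full; the proofs are below) =====
def Claim_equal_minSwaps_2 : Prop := ∀ (grid : List (List Int)), Dom_minSwaps_2 grid → Pre_minSwaps_2 grid → Spec_minSwaps_2 grid (minSwaps_2 grid)

-- ===== LEMMAS AND PROOFS =====

-- ---- phase 1: the two trailing-zero counters agree ----
theorem pvA_count_eq (row : List Int) (n : Nat) (h : n ≤ row.length) :
    pvA_count row n = pvB_count ((row.take n).reverse) := by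
  induction n with
  | zero => simp [pvA_count, pvB_count]
  | succ j ih =>
    have hj : j < row.length := h
    have ht : row.take (j + 1) = row.take j ++ [row[j]] := by
      rw [List.take_succ]; simp [List.getElem?_eq_getElem hj]
    rw [pvA_count, ht, List.reverse_append]
    simp only [List.reverse_singleton, List.singleton_append, pvB_count]
    rw [List.getD_eq_getElem row 0 hj]
    by_cases h0 : row[j] = 0
    · simp [h0, ih (le_of_lt hj)]
    · simp [h0]

theorem pvA_count_le (row : List Int) (n : Nat) : pvA_count row n ≤ n := by
  induction n with
  | zero => simp [pvA_count]
  | succ j ih =>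
    rw [pvA_count]
    split
    · omega
    · omega

-- ---- phase 2: free-slot search characterisation ----
theorem pvA_find_eq_head (temp : List Int) (s n : Nat) :
    pvA_find temp s n =
      ((List.range' s (n - s)).filter (fun k => decide (temp.getD k 0 = -1))).head? := by
  suffices H : ∀ d s, n - s = d → pvA_find temp s n =
      ((List.range' s (n - s)).filter (fun k => decide (temp.getD k 0 = -1))).head? from
    H (n - s) s rfl
  intro d
  induction d with
  | zero =>
    intro s hs
    have hns : ¬ s < n := by omega
    rw [pvA_find, if_neg hns, hs]
    simp
  | succ d ih =>
    intro s hs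
    have hsn : s < n := by omega
    rw [pvA_find, if_pos hsn, hs, List.range'_succ]
    by_cases hP : temp.getD s 0 = -1
    · rw [if_pos hP, List.filter_cons_of_pos (by simpa using hP)]
      rfl
    · rw [if_neg hP, List.filter_cons_of_neg (by simpa using hP)]
      have := ih (s + 1) (by omega)
      rw [show n - (s + 1) = d by omega] at this
      exact this

theorem find?_all_true {α : Type} (p : α → Bool) (l : List α) (h : ∀ x ∈ l, p x = true) :
    l.find? p = l.head? := by
  cases l with
  | nil => rfl
  | cons x t => rw [List.find?_cons_of_pos (h x (by simp))]; rfl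

theorem find?_congr {α : Type} (p q : α → Bool) (l : List α) (h : ∀ x ∈ l, p x = q x) :
    l.find? p = l.find? q := by
  induction l with
  | nil => rfl
  | cons x t ih =>
    have hx := h x (by simp)
    by_cases hp : p x = true
    · rw [List.find?_cons_of_pos hp, List.find?_cons_of_pos (hx ▸ hp)]
    · rw [List.find?_cons_of_neg (by simpa using hp),
        List.find?_cons_of_neg (by rw [← hx]; simpa using hp)]
      exact ih (fun y hy => h y (by simp [hy]))

theorem find?_filter_range (P : Nat → Bool) (s n : Nat) (hs : s ≤ n) :
    ((List.range n).filter P).find? (fun k => decide (s ≤ k)) =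
      ((List.range' s (n - s)).filter P).head? := by
  have hsplit : List.range n = List.range' 0 s ++ List.range' s (n - s) := by
    have h := @List.range'_append 0 s (n - s) 1
    simp only [Nat.one_mul, Nat.zero_add] at h
    rw [show s + (n - s) = n by omega] at h
    exact List.range_eq_range'.trans h.symm
  rw [hsplit, List.filter_append, List.find?_append]
  have h1 : (List.filter P (List.range' 0 s)).find? (fun k => decide (s ≤ k)) = none := by
    rw [List.find?_eq_none]
    intro x hx
    have hx' : x ∈ List.range' 0 s := List.mem_of_mem_filter hx
    have := (List.mem_range'_1.1 hx').2
    simp; omega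
  rw [h1, Option.none_or]
  apply find?_all_true
  intro x hx
  have hx' : x ∈ List.range' s (n - s) := List.mem_of_mem_filter hx
  have := (List.mem_range'_1.1 hx').1
  simpa

theorem filter_erase_nodup (P : Nat → Bool) (a : Nat) (ha : P a = true) :
    ∀ (l : List Nat), l.Nodup →
      (l.filter P).erase a = l.filter (fun k => P k && decide (k ≠ a)) := by
  intro l
  induction l with
  | nil => intro _; rfl
  | cons x t ih =>
    intro hnd
    have hxt : x ∉ t := (List.nodup_cons.1 hnd).1
    have hnd' : t.Nodup := (List.nodup_cons.1 hnd).2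
    by_cases hxa : x = a
    · subst hxa
      rw [List.filter_cons_of_pos ha, List.erase_cons_head, List.filter_cons_of_neg (by simp)]
      apply List.filter_congr
      intro y hy
      have : y ≠ x := fun h => hxt (h ▸ hy)
      simp [this]
    · by_cases hPx : P x = true
      · rw [List.filter_cons_of_pos hPx, List.erase_cons_tail (by simpa using hxa),
          List.filter_cons_of_pos (by simp [hPx, hxa]), ih hnd']
      · rw [List.filter_cons_of_neg (by simpa using hPx),
          List.filter_cons_of_neg (by simp [hPx]), ih hnd']

-- ---- phase 3: bubble-sort swap count = inversion count ----
def invN : List Int → Nat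
  | [] => 0
  | x :: t => t.countP (fun y => decide (y < x)) + invN t

theorem pvB_inv_eq_invN (l : List Int) : pvB_inv l = (invN l : Int) := by
  induction l with
  | nil => rfl
  | cons x t ih => rw [pvB_inv, invN, ih]; push_cast; ring

def pass1 : Nat → List Int → List Int × Nat
  | 0, l => (l, 0)
  | _ + 1, [] => ([], 0)
  | _ + 1, [a] => ([a], 0)
  | m + 1, a :: b :: t =>
    if b < a then (b :: (pass1 m (a :: t)).1, (pass1 m (a :: t)).2 + 1)
    else (a :: (pass1 m (b :: t)).1, (pass1 m (b :: t)).2)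

def passes : Nat → List Int → List Int × Nat
  | 0, l => (l, 0)
  | k + 1, l => ((passes k (pass1 k l).1).1, (pass1 k l).2 + (passes k (pass1 k l).1).2)

theorem pass1_nil (m : Nat) : pass1 m [] = ([], 0) := by cases m <;> rfl

theorem pass1_single (m : Nat) (a : Int) : pass1 m [a] = ([a], 0) := by cases m <;> rfl

theorem pass1_perm (m : Nat) : ∀ l : List Int, ((pass1 m l).1).Perm l := by
  induction m with
  | zero => intro l; simp [pass1]
  | succ m ih =>
    intro l
    match l with
    | [] => simp [pass1]
    | [a] => simp [pass1]
    | a :: b :: t =>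
      rw [pass1]
      by_cases h : b < a
      · simp only [if_pos h]
        exact ((ih (a :: t)).cons b).trans (List.Perm.swap a b t)
      · simp only [if_neg h]
        exact (ih (b :: t)).cons a

theorem passes_perm (k : Nat) : ∀ l : List Int, ((passes k l).1).Perm l := by
  induction k with
  | zero => intro l; simp [passes]
  | succ k ih => intro l; rw [passes]; exact (ih _).trans (pass1_perm k l)

theorem pass1_inv (m : Nat) : ∀ l : List Int, invN l = invN (pass1 m l).1 + (pass1 m l).2 := by
  induction m with
  | zero => intro l; simp [pass1]
  | succ m ih =>
    intro l
    match l with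
    | [] => simp [pass1]
    | [a] => simp [pass1]
    | a :: b :: t =>
      rw [pass1]
      by_cases h : b < a
      · have h2 : ¬ a < b := lt_asymm h
        have hc := (pass1_perm m (a :: t)).countP_eq (fun y => decide (y < b))
        have ihh := ih (a :: t)
        simp only [if_pos h]
        simp [invN, List.countP_cons, h, h2] at hc ihh ⊢
        omega
      · have hc := (pass1_perm m (b :: t)).countP_eq (fun y => decide (y < a))
        have ihh := ih (b :: t)
        simp only [if_neg h]
        simp [invN, List.countP_cons, h] at hc ihh ⊢
        omega

theorem passes_inv (k : Nat) : ∀ l : List Int, invN l = invN (passes k l).1 + (passes k l).2 := by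
  induction k with
  | zero => intro l; simp [passes]
  | succ k ih =>
    intro l
    have h1 := pass1_inv k l
    have h2 := ih (pass1 k l).1
    rw [passes]
    dsimp only
    omega

theorem pass1_maxEnd (m : Nat) : ∀ l : List Int, l ≠ [] → l.length ≤ m + 1 →
    ∃ v mx, (pass1 m l).1 = v ++ [mx] ∧ ∀ x ∈ l, x ≤ mx := by
  induction m with
  | zero =>
    intro l hne hlen
    match l with
    | [a] => exact ⟨[], a, rfl, by simp⟩
  | succ m ih =>
    intro l hne hlen
    match l with
    | [a] => exact ⟨[], a, by simp [pass1_single], by simp⟩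
    | a :: b :: t =>
      rw [pass1]
      by_cases h : b < a
      · obtain ⟨v, mx, hv, hmx⟩ := ih (a :: t) (by simp) (by simp at hlen ⊢; omega)
        refine ⟨b :: v, mx, by simp [if_pos h, hv], ?_⟩
        intro x hx
        rcases List.mem_cons.1 hx with rfl | hx
        · exact hmx x (by simp)
        rcases List.mem_cons.1 hx with rfl | hx
        · exact le_of_lt (lt_of_lt_of_le h (hmx a (by simp)))
        · exact hmx x (by simp [hx])
      · obtain ⟨v, mx, hv, hmx⟩ := ih (b :: t) (by simp) (by simp at hlen ⊢; omega)
        refine ⟨a :: v, mx, by simp [if_neg h, hv], ?_⟩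
        intro x hx
        rcases List.mem_cons.1 hx with rfl | hx
        · exact le_trans (not_lt.1 h) (hmx b (by simp))
        · exact hmx x hx

theorem pass1_append_max (m : Nat) : ∀ (v : List Int) (mx : Int), (∀ x ∈ v, x ≤ mx) →
    pass1 m (v ++ [mx]) = ((pass1 m v).1 ++ [mx], (pass1 m v).2) := by
  induction m with
  | zero => intro v mx h; simp [pass1]
  | succ m ih =>
    intro v mx h
    match v with
    | [] => simp [pass1_nil, pass1_single]
    | [a] =>
      have hna : ¬ mx < a := not_lt.2 (h a (by simp))
      simp [pass1, hna, pass1_single, pass1_nil]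
    | a :: b :: t =>
      have hstep : (a :: b :: t) ++ [mx] = a :: b :: (t ++ [mx]) := rfl
      rw [hstep, pass1, pass1]
      by_cases hab : b < a
      · have := ih (a :: t) mx (fun x hx => h x (by rcases List.mem_cons.1 hx with rfl | hx <;> simp [hx]))
        rw [if_pos hab, if_pos hab, show a :: (t ++ [mx]) = (a :: t) ++ [mx] from rfl, this]
        rfl
      · have := ih (b :: t) mx (fun x hx => h x (by rcases List.mem_cons.1 hx with rfl | hx <;> simp [hx]))
        rw [if_neg hab, if_neg hab, show b :: (t ++ [mx]) = (b :: t) ++ [mx] from rfl, this]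
        rfl

theorem passes_append_max (k : Nat) : ∀ (v : List Int) (mx : Int), (∀ x ∈ v, x ≤ mx) →
    passes k (v ++ [mx]) = ((passes k v).1 ++ [mx], (passes k v).2) := by
  induction k with
  | zero => intro v mx h; simp [passes]
  | succ k ih =>
    intro v mx h
    rw [passes, passes, pass1_append_max k v mx h]
    have hmem : ∀ x ∈ (pass1 k v).1, x ≤ mx := fun x hx => h x ((pass1_perm k v).subset hx)
    rw [ih (pass1 k v).1 mx hmem]

theorem passes_sorted (k : Nat) : ∀ l : List Int, l.length ≤ k →
    ((passes k l).1).Pairwise (· ≤ ·) := by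
  induction k with
  | zero =>
    intro l h
    have : l = [] := List.eq_nil_of_length_eq_zero (by omega)
    subst this; simp [passes]
  | succ k ih =>
    intro l hlen
    rw [passes]
    by_cases hne : l = []
    · subst hne; rw [pass1_nil]; exact ih [] (by simp)
    · obtain ⟨v, mx, hv, hmx⟩ := pass1_maxEnd k l hne (by omega)
      have hvm : ∀ x ∈ v, x ≤ mx := fun x hx =>
        hmx x ((pass1_perm k l).subset (hv ▸ List.mem_append_left _ hx))
      rw [hv, passes_append_max k v mx hvm]
      have hvlen : v.length ≤ k := by
        have := (pass1_perm k l).length_eq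
        rw [hv] at this; simp at this; omega
      rw [List.pairwise_append]
      refine ⟨ih v hvlen, by simp, ?_⟩
      intro x hx y hy
      simp at hy; subst hy
      exact hvm x ((passes_perm k v).subset hx)

theorem invN_sorted : ∀ l : List Int, l.Pairwise (· ≤ ·) → invN l = 0 := by
  intro l
  induction l with
  | nil => intro _; rfl
  | cons x t ih =>
    intro h
    obtain ⟨hx, ht⟩ := List.pairwise_cons.1 h
    rw [invN, ih ht, List.countP_eq_zero.2 (fun y hy => by simpa using not_lt.2 (hx y hy))]

theorem swapStep_shift (x : Int) (l : List Int) (a : Int) (j : Nat) :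
    pvA_swapStep (x :: l, a) (j + 1) =
      ((x :: (pvA_swapStep (l, a) j).1), (pvA_swapStep (l, a) j).2) := by
  simp only [pvA_swapStep, List.getD_cons_succ, List.set_cons_succ]
  split <;> simp_all

theorem foldl_swapStep_shift (js : List Nat) : ∀ (x : Int) (l : List Int) (a : Int),
    (js.map Nat.succ).foldl pvA_swapStep (x :: l, a) =
      ((x :: (js.foldl pvA_swapStep (l, a)).1), (js.foldl pvA_swapStep (l, a)).2) := by
  induction js with
  | nil => intro x l a; rfl
  | cons j js ih =>
    intro x l a
    rw [List.map_cons, List.foldl_cons, List.foldl_cons,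
      show Nat.succ j = j + 1 from rfl, swapStep_shift]
    exact ih x (pvA_swapStep (l, a) j).1 (pvA_swapStep (l, a) j).2

theorem inner_eq_pass1 (m : Nat) : ∀ (l : List Int) (a : Int), m < l.length →
    (List.range m).foldl pvA_swapStep (l, a) = ((pass1 m l).1, a + ((pass1 m l).2 : Int)) := by
  induction m with
  | zero => intro l a _; simp [pass1]
  | succ m ih =>
    intro l a hm
    match l, hm with
    | p :: q :: t, hm =>
      have hlen : m < (p :: t).length := by simp at hm ⊢; omega
      rw [List.range_succ_eq_map, List.foldl_cons, pass1]
      by_cases h : q < p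
      · have hstep : pvA_swapStep (p :: q :: t, a) 0 = (q :: p :: t, a + 1) := by
          simp [pvA_swapStep, h]
        rw [hstep, show (q :: p :: t : List Int) = q :: (p :: t) from rfl,
          foldl_swapStep_shift, ih (p :: t) (a + 1) hlen, if_pos h]
        rw [Prod.ext_iff]
        refine ⟨rfl, ?_⟩
        dsimp only
        push_cast; ring
      · have hstep : pvA_swapStep (p :: q :: t, a) 0 = (p :: q :: t, a) := by
          simp [pvA_swapStep, h]
        have hlen2 : m < (q :: t).length := by simp at hm ⊢; omega
        rw [hstep, show (p :: q :: t : List Int) = p :: (q :: t) from rfl,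
          foldl_swapStep_shift, ih (q :: t) a hlen2, if_neg h]

theorem outer_eq_passes (n : Nat) : ∀ (l : List Int) (a : Int), n ≤ l.length →
    (List.range n).foldl (fun st i => (List.range (n - i - 1)).foldl pvA_swapStep st) (l, a) =
      ((passes n l).1, a + ((passes n l).2 : Int)) := by
  induction n with
  | zero => intro l a _; simp [passes]
  | succ n ih =>
    intro l a hlen
    rw [List.range_succ_eq_map, List.foldl_cons, List.foldl_map]
    have h0 : n + 1 - 0 - 1 = n := by omega
    rw [h0, inner_eq_pass1 n l a (by omega)]
    have hfun : (fun (st : List Int × Int) (i : Nat) =>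
        (List.range (n + 1 - Nat.succ i - 1)).foldl pvA_swapStep st) =
        (fun st i => (List.range (n - i - 1)).foldl pvA_swapStep st) := by
      funext st i
      rw [show n + 1 - Nat.succ i - 1 = n - i - 1 by omega]
    rw [hfun]
    have hplen : n ≤ (pass1 n l).1.length := by
      rw [(pass1_perm n l).length_eq]; omega
    rw [ih (pass1 n l).1 (a + ((pass1 n l).2 : Int)) hplen, passes]
    rw [Prod.ext_iff]
    refine ⟨rfl, ?_⟩
    dsimp only
    push_cast; ring

theorem bubble_eq_invN (n : Nat) (l : List Int) (h : l.length = n) :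
    pvA_bubble n l = (invN l : Int) := by
  unfold pvA_bubble
  rw [outer_eq_passes n l 0 (by omega)]
  have h1 := passes_inv n l
  have h2 : invN (passes n l).1 = 0 := invN_sorted _ (passes_sorted n l (by omega))
  simp only []
  omega

-- ---- phase 2: the simulation between A's temp array and B's free list ----
theorem sim (grid : List (List Int)) (n : Nat)
    (hrow : ∀ i, i < n → n ≤ (grid.getD i []).length) :
    ∀ (is : List Nat) (temp free perm : List Int),
      (∀ i ∈ is, i < n) → temp.length = n → perm.length = n →
      free = (((List.range n).filter (fun k => decide (temp.getD k 0 = -1))).map Int.ofNat) →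
      (∀ k, k < n → temp.getD k 0 ≠ -1 → perm.getD k 0 = temp.getD k 0) →
      (pvA_loop grid n is temp = none → pvB_loop grid n is free perm = none) ∧
      (∀ t', pvA_loop grid n is temp = some t' →
        ∃ p', pvB_loop grid n is free perm = some p' ∧ t'.length = n ∧ p'.length = n ∧
          (∀ k, k < n → t'.getD k 0 ≠ -1 → p'.getD k 0 = t'.getD k 0) ∧
          ((List.range n).filter (fun k => decide (t'.getD k 0 = -1))).length + is.length =
            ((List.range n).filter (fun k => decide (temp.getD k 0 = -1))).length) := by
  intro is
  induction is with
  | nil =>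
    intro temp free perm _ hlt hlp hfree hagree
    constructor
    · intro h; simp [pvA_loop] at h
    · intro t' ht'
      rw [pvA_loop] at ht'
      obtain rfl : temp = t' := by injection ht'
      exact ⟨perm, by rw [pvB_loop], hlt, hlp, hagree, by simp⟩
  | cons i rest ih =>
    intro temp free perm hmem hlt hlp hfree hagree
    have hi : i < n := hmem i (by simp)
    have hrl : n ≤ (grid.getD i []).length := hrow i hi
    -- names for the quantities both loops compute
    generalize hc : pvA_count (grid.getD i []) n = c at *
    have hcB : pvB_count (((grid.getD i []).take n).reverse) = c := by
      rw [← hc]; exact (pvA_count_eq _ n hrl).symm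
    have hcle : c ≤ n := by rw [← hc]; exact pvA_count_le _ n
    generalize hvalue : (if ((n : Int) - 1 - (c : Int)) < 0 then 0
      else ((n : Int) - 1 - (c : Int)).toNat) = value
    have hvn : value < n := by
      rw [← hvalue]
      by_cases h : ((n : Int) - 1 - (c : Int)) < 0 <;> simp [h] <;> omega
    have hlo : (if ((n : Int) - 1 - (c : Int)) < 0 then (0 : Int)
        else ((n : Int) - 1 - (c : Int))) = (value : Int) := by
      rw [← hvalue]
      by_cases h : ((n : Int) - 1 - (c : Int)) < 0 <;> simp [h] <;> omega
    have hvc1 : c < n → value = n - 1 - c := by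
      intro h; rw [← hvalue, if_neg (by omega)]; omega
    have hvc2 : c = n → value = 0 := by
      intro h; rw [← hvalue, if_pos (by omega)]
    -- unfold one step of each loop
    have hAstep : pvA_loop grid n (i :: rest) temp =
        (if temp.getD value 0 ≠ -1 then
          match pvA_find temp (n - c) n with
          | none => none
          | some k => pvA_loop grid n rest (temp.set k (i : Int))
         else pvA_loop grid n rest (temp.set value (i : Int))) := by
      rw [pvA_loop, hc, hvalue]
    have hBstep : pvB_loop grid n (i :: rest) free perm =
        (match free.find? (fun f => decide ((value : Int) ≤ f)) with
         | none => none
         | some slot => pvB_loop grid n rest (free.erase slot) (perm.set slot.toNat (i : Int))) := by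
      rw [pvB_loop, hcB, hlo]
    -- B's search over the free list is A's search over the -1 slots of temp
    have hmap : free.find? (fun f => decide ((value : Int) ≤ f)) =
        (((List.range n).filter (fun k => decide (temp.getD k 0 = -1))).find?
          (fun k => decide (value ≤ k))).map Int.ofNat := by
      rw [hfree, List.find?_map]
      congr 1
      apply find?_congr
      intro x _
      simp [Function.comp]
    -- the one advancing step, shared by both branches
    have step : ∀ k, k < n → (decide (temp.getD k 0 = -1)) = true →
        (pvA_loop grid n rest (temp.set k (i : Int)) = none →
          pvB_loop grid n rest (free.erase (Int.ofNat k)) (perm.set k (i : Int)) = none) ∧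
        (∀ t', pvA_loop grid n rest (temp.set k (i : Int)) = some t' →
          ∃ p', pvB_loop grid n rest (free.erase (Int.ofNat k)) (perm.set k (i : Int)) = some p' ∧
            t'.length = n ∧ p'.length = n ∧
            (∀ x, x < n → t'.getD x 0 ≠ -1 → p'.getD x 0 = t'.getD x 0) ∧
            ((List.range n).filter (fun x => decide (t'.getD x 0 = -1))).length + (i :: rest).length =
              ((List.range n).filter (fun x => decide (temp.getD x 0 = -1))).length) := by
      intro k hk hPk
      have hgetset : ∀ x, (temp.set k (i : Int)).getD x 0 =
          if x = k then (i : Int) else temp.getD x 0 := by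
        intro x
        rw [List.getD_eq_getElem?_getD, List.getElem?_set]
        by_cases hx : x = k
        · simp [hx, hlt ▸ hk]
        · simp [Ne.symm hx, hx, List.getD_eq_getElem?_getD]
      have hpermset : ∀ x, (perm.set k (i : Int)).getD x 0 =
          if x = k then (i : Int) else perm.getD x 0 := by
        intro x
        rw [List.getD_eq_getElem?_getD, List.getElem?_set]
        by_cases hx : x = k
        · simp [hx, hlp ▸ hk]
        · simp [Ne.symm hx, hx, List.getD_eq_getElem?_getD]
      have hfree' : free.erase (Int.ofNat k) =
          (((List.range n).filter (fun x => decide ((temp.set k (i : Int)).getD x 0 = -1))).map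
            Int.ofNat) := by
        rw [hfree, ← List.map_erase (fun a b h => Int.ofNat.inj h),
          filter_erase_nodup _ k hPk (List.range n) List.nodup_range]
        congr 1
        apply List.filter_congr
        intro x _
        rw [hgetset]
        by_cases hx : x = k
        · subst hx
          have hne : ¬((i : Int) = -1) := by omega
          simp [hne]
        · simp [hx]
      have hagree' : ∀ x, x < n → (temp.set k (i : Int)).getD x 0 ≠ -1 →
          (perm.set k (i : Int)).getD x 0 = (temp.set k (i : Int)).getD x 0 := by
        intro x hxn hne
        rw [hgetset] at hne ⊢
        rw [hpermset]
        by_cases hx : x = k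
        · simp [hx]
        · simp only [if_neg hx] at hne ⊢
          exact hagree x hxn hne
      have hF'len : ((List.range n).filter
            (fun x => decide ((temp.set k (i : Int)).getD x 0 = -1))).length + 1 =
          ((List.range n).filter (fun x => decide (temp.getD x 0 = -1))).length := by
        have hkmem : k ∈ (List.range n).filter (fun x => decide (temp.getD x 0 = -1)) :=
          List.mem_filter.2 ⟨List.mem_range.2 hk, hPk⟩
        have hmapinj : ((List.range n).filter
              (fun x => decide ((temp.set k (i : Int)).getD x 0 = -1))).map Int.ofNat =
            (((List.range n).filter (fun x => decide (temp.getD x 0 = -1))).map Int.ofNat).erase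
              (Int.ofNat k) := by
          rw [← hfree, ← hfree']
        have hlen2 := congrArg List.length hmapinj
        rw [List.length_erase_of_mem (List.mem_map_of_mem hkmem), List.length_map,
          List.length_map] at hlen2
        have hpos := List.length_pos_of_mem hkmem
        omega
      obtain ⟨ihnone, ihsome⟩ := ih (temp.set k (i : Int)) (free.erase (Int.ofNat k))
        (perm.set k (i : Int)) (fun j hj => hmem j (by simp [hj])) (by simp [hlt])
        (by simp [hlp]) hfree' hagree'
      refine ⟨ihnone, ?_⟩
      intro t' ht'
      obtain ⟨p', hp', hl1, hl2, hag, hlen⟩ := ihsome t' ht'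
      exact ⟨p', hp', hl1, hl2, hag, by simp only [List.length_cons]; omega⟩
    by_cases hA : temp.getD value 0 = -1
    · -- A assigns slot 'value' directly; B's first free slot ≥ value is 'value' itself
      have hBfind : ((List.range n).filter (fun k => decide (temp.getD k 0 = -1))).find?
          (fun k => decide (value ≤ k)) = some value := by
        rw [find?_filter_range _ value n (le_of_lt hvn),
          show n - value = (n - value - 1) + 1 by omega, List.range'_succ,
          List.filter_cons_of_pos (by simpa using hA)]
        rfl
      rw [hAstep, hBstep, if_neg (by simpa using hA), hmap, hBfind]
      simpa using step value hvn (by simpa using hA)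
    · -- A scans from n - c; B's search coincides with it
      have hs : ((List.range n).filter (fun k => decide (temp.getD k 0 = -1))).find?
          (fun k => decide (value ≤ k)) = pvA_find temp (n - c) n := by
        rw [pvA_find_eq_head, ← find?_filter_range _ (n - c) n (by omega)]
        apply find?_congr
        intro x hx
        have hxF := List.mem_filter.1 hx
        have hxne : x ≠ value := by
          intro h; exact hA (by simpa [h] using hxF.2)
        simp only [decide_eq_decide]
        by_cases hcn : c < n
        · have := hvc1 hcn; omega
        · have := hvc2 (by omega); omega
      rw [hAstep, hBstep, if_pos hA, hmap, hs]
      cases hAfind : pvA_find temp (n - c) n with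
      | none => simp
      | some k =>
        have hkprop : k ∈ (List.range n).filter (fun x => decide (temp.getD x 0 = -1)) :=
          List.mem_of_find?_eq_some (by rw [hs, hAfind])
        have hkF := List.mem_filter.1 hkprop
        have hkn : k < n := List.mem_range.1 hkF.1
        simpa using step k hkn hkF.2

-- ===== VERDICT (by name: the statement is the Claim_ definition above) =====
theorem minSwaps_2_spec : Claim_equal_minSwaps_2 := by
  intro grid _ hpre
  unfold Spec_minSwaps_2
  have hrow : ∀ i, i < grid.length → grid.length ≤ (grid.getD i []).length := by
    intro i hi
    rw [List.getD_eq_getElem grid [] hi]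
    exact hpre _ (List.getElem_mem hi)
  have hrep : ((List.range grid.length).filter
      (fun k => decide ((List.replicate grid.length (-1 : Int)).getD k 0 = -1))) =
      List.range grid.length := by
    apply List.filter_eq_self.2
    intro a ha
    rw [List.getD_replicate (-1) (List.mem_range.1 ha)]
    simp
  obtain ⟨hnone, hsome⟩ := sim grid grid.length hrow (List.range grid.length)
      (List.replicate grid.length (-1)) ((List.range grid.length).map Int.ofNat)
      (List.replicate grid.length (0 : Int))
      (fun i hi => List.mem_range.1 hi) (by simp) (by simp) (by rw [hrep])
      (fun k hk hne => absurd (List.getD_replicate (-1) hk) hne)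
  simp only [minSwaps_2, minSwaps_2_alt]
  cases hres : pvA_loop grid grid.length (List.range grid.length)
      (List.replicate grid.length (-1)) with
  | none => rw [hnone hres]
  | some t' =>
    obtain ⟨p', hp', hl1, hl2, hag, hlen⟩ := hsome t' hres
    rw [hp']
    have hF0 : ((List.range grid.length).filter
        (fun k => decide (t'.getD k 0 = -1))).length = 0 := by
      rw [hrep] at hlen
      simp only [List.length_range] at hlen ⊢
      omega
    have hall : ∀ k, k < grid.length → t'.getD k 0 ≠ -1 := by
      intro k hk
      have hnil := List.length_eq_zero_iff.1 hF0
      have := List.filter_eq_nil_iff.1 hnil k (List.mem_range.2 hk)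
      simpa using this
    have hteq : t' = p' := by
      apply List.ext_getElem (hl1.trans hl2.symm)
      intro k h1 h2
      have := hag k (hl1 ▸ h1) (hall k (hl1 ▸ h1))
      rw [List.getD_eq_getElem t' 0 h1, List.getD_eq_getElem p' 0 h2] at this
      exact this.symm
    show pvA_bubble grid.length t' = pvB_inv p'
    rw [bubble_eq_invN grid.length t' hl1, pvB_inv_eq_invN, hteq]
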